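-- pv_equiv track=rewrite | github.com/davidtheplatform/Noml | editor.py | word_at_idx
-- ===== SOURCE A (Python) =====
-- def word_at_idx(input_string, index):
--     words = input_string.split()
--     current_index = 0
--     for word in words:
--         word_start = current_index
--         word_end = current_index + len(word)
--         if word_start <= index < word_end:
--             return word
--         current_index = word_end + 1
--     return None
-- ===== SOURCE B (Python) =====
-- def word_at_idx(input_string, index):
--     words = input_string.split()
--     starts = []
--     pos = 0
--     for w in words:
--         starts.append(pos)
--         pos += len(w) + 1
--     # binary search: rightmost i with starts[i] <= index (bisect_right by hand)
--     lo, hi = 0, len(starts)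
--     while lo < hi:
--         mid = (lo + hi) // 2
--         if starts[mid] <= index:
--             lo = mid + 1
--         else:
--             hi = mid
--     i = lo - 1
--     if i >= 0 and index < starts[i] + len(words[i]):
--         return words[i]
--     return None
-- ===== Notes on version B (the rewrite author's own statement) =====
-- stated objective: alternative
-- what changed: B builds a cumulative start-offset table for the words once and then binary-searches it for the word containing the index, instead of A's linear scan carrying a running offset.
import Mathlib
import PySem

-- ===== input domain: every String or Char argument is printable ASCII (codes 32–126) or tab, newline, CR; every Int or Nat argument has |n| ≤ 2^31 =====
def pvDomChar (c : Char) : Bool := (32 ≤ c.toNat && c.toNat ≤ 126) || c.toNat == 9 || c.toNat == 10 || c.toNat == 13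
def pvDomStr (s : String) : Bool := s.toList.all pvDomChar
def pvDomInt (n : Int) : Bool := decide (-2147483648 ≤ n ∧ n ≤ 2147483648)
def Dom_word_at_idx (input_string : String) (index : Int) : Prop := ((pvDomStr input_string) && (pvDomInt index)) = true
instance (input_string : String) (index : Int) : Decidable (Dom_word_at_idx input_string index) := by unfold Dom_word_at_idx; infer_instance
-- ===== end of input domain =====

-- B replaces A's linear scan by a cumulative start-offset table plus a hand-written
-- binary search (bisect_right) over it; same result, different algorithm (objective: alternative).

-- ===== PORT A =====
-- A's for-loop over the words, carrying current_index
def pvLoopA (index : Int) : List String → Int → Option String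
  | [], _ => none
  | word :: ws, current_index =>
    let word_start := current_index
    let word_end := current_index + PySem.Str.len word
    if word_start ≤ index ∧ index < word_end then some word
    else pvLoopA index ws (word_end + 1)

def word_at_idx (input_string : String) (index : Int) : Option String :=
  pvLoopA index (PySem.Str.split₀ input_string) 0

-- ===== PORT B =====
-- B's first loop: the list of start offsets (starts.append(pos); pos += len(w)+1)
def pvStarts : List String → Int → List Int
  | [], _ => []
  | w :: ws, pos => pos :: pvStarts ws (pos + PySem.Str.len w + 1)

-- B's while-loop: rightmost insertion point for index in starts (bisect_right by hand).
-- starts[mid] accessed via getD: exact here since lo ≤ mid < hi ≤ len(starts) always holds.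
def pvBsearch (starts : List Int) (index : Int) (lo hi : Nat) : Nat :=
  if _h : lo < hi then
    let mid := (lo + hi) / 2
    if starts.getD mid 0 ≤ index then pvBsearch starts index (mid + 1) hi
    else pvBsearch starts index lo mid
  else lo
termination_by hi - lo
decreasing_by all_goals omega

def word_at_idx_alt (input_string : String) (index : Int) : Option String :=
  let words := PySem.Str.split₀ input_string
  let starts := pvStarts words 0
  let lo := pvBsearch starts index 0 starts.length
  if 1 ≤ lo then
    let i := lo - 1
    if index < starts.getD i 0 + PySem.Str.len (words.getD i "") then some (words.getD i "")
    else none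
  else none

-- ===== PRECONDITION & SPEC =====
def Spec_word_at_idx (input_string : String) (index : Int) (out : Option String) : Prop := out = word_at_idx_alt input_string index
instance (input_string : String) (index : Int) (out : Option String) : Decidable (Spec_word_at_idx input_string index out) := by unfold Spec_word_at_idx; infer_instance

-- ===== CLAIM (what is proved, stated in full; the proofs are below) =====
def Claim_equal_word_at_idx : Prop := ∀ (input_string : String) (index : Int), Dom_word_at_idx input_string index → Spec_word_at_idx input_string index (word_at_idx input_string index)

-- ===== LEMMAS AND PROOFS =====

-- r is the bisect_right point of index in starts
def pvBoundary (starts : List Int) (index : Int) (r : Nat) : Prop :=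
  r ≤ starts.length ∧ (∀ j, j < r → starts.getD j 0 ≤ index) ∧
    (∀ j, r ≤ j → j < starts.length → index < starts.getD j 0)

lemma pvStarts_length (ws : List String) (pos : Int) : (pvStarts ws pos).length = ws.length := by
  induction ws generalizing pos with
  | nil => rfl
  | cons w ws ih => simp [pvStarts, ih]

lemma pvStarts_le (ws : List String) (pos : Int) (k : Nat) (hk : k < (pvStarts ws pos).length) :
    pos ≤ (pvStarts ws pos).getD k 0 := by
  induction ws generalizing pos k with
  | nil => simp [pvStarts] at hk
  | cons w ws ih =>
    cases k with
    | zero => simp [pvStarts]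
    | succ k =>
      simp only [pvStarts, List.getD_cons_succ]
      have h0 : (0:Int) ≤ PySem.Str.len w := by
        simp [PySem.Str.len_eq]
      have := ih (pos + PySem.Str.len w + 1) k (by simp [pvStarts] at hk ⊢; omega)
      omega

lemma pvStarts_mono (ws : List String) (pos : Int) (j k : Nat) (hjk : j ≤ k)
    (hk : k < (pvStarts ws pos).length) :
    (pvStarts ws pos).getD j 0 ≤ (pvStarts ws pos).getD k 0 := by
  induction ws generalizing pos j k with
  | nil => simp [pvStarts] at hk
  | cons w ws ih =>
    cases j with
    | zero =>
      have := pvStarts_le (w :: ws) pos k hk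
      simpa [pvStarts] using this
    | succ j =>
      cases k with
      | zero => omega
      | succ k =>
        simp only [pvStarts, List.getD_cons_succ]
        exact ih (pos + PySem.Str.len w + 1) j k (by omega) (by simp [pvStarts] at hk ⊢; omega)

lemma pvBsearch_boundary (starts : List Int) (index : Int)
    (hmono : ∀ j k, j ≤ k → k < starts.length → starts.getD j 0 ≤ starts.getD k 0) :
    ∀ (n lo hi : Nat), hi - lo = n → lo ≤ hi → hi ≤ starts.length →
      (∀ j, j < lo → starts.getD j 0 ≤ index) →
      (∀ j, hi ≤ j → j < starts.length → index < starts.getD j 0) →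
      pvBoundary starts index (pvBsearch starts index lo hi) := by
  intro n
  induction n using Nat.strong_induction_on with
  | _ n ih =>
    intro lo hi hn hlh hhl hlow hhigh
    rw [pvBsearch]
    split
    · rename_i h
      by_cases hm : starts.getD ((lo + hi) / 2) 0 ≤ index
      · simp only [hm, if_true]
        refine ih (hi - ((lo + hi) / 2 + 1)) (by omega) ((lo + hi) / 2 + 1) hi rfl (by omega) hhl ?_ hhigh
        intro j hj
        rcases Nat.lt_or_ge j lo with hj' | hj'
        · exact hlow j hj'
        · exact le_trans (hmono j ((lo + hi) / 2) (by omega) (by omega)) hm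
      · simp only [hm, if_false]
        refine ih ((lo + hi) / 2 - lo) (by omega) lo ((lo + hi) / 2) rfl (by omega) (by omega) hlow ?_
        intro j hj hj2
        have h1 : index < starts.getD ((lo + hi) / 2) 0 := by omega
        exact lt_of_lt_of_le h1 (hmono ((lo + hi) / 2) j hj hj2)
    · rename_i h
      refine ⟨by omega, hlow, fun j hj hj2 => hhigh j (by omega) hj2⟩

lemma pvLoopA_eq (index : Int) (ws : List String) :
    ∀ (ci : Int) (r : Nat), pvBoundary (pvStarts ws ci) index r →
    pvLoopA index ws ci =
      if 1 ≤ r then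
        (if index < (pvStarts ws ci).getD (r - 1) 0 + PySem.Str.len (ws.getD (r - 1) "")
         then some (ws.getD (r - 1) "") else none)
      else none := by
  induction ws with
  | nil =>
    intro ci r hb
    obtain ⟨hr, _, _⟩ := hb
    simp [pvStarts] at hr
    simp [pvLoopA, hr]
  | cons w ws ih =>
    intro ci r hb
    obtain ⟨hr, hlow, hhigh⟩ := hb
    have hlen : (pvStarts (w :: ws) ci).length = ws.length + 1 := by
      simp [pvStarts, pvStarts_length]
    by_cases hc : ci ≤ index
    · have hr1 : 1 ≤ r := by
        by_contra hr0
        have := hhigh 0 (by omega) (by omega)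
        simp [pvStarts] at this
        omega
      by_cases hidx : index < ci + PySem.Str.len w
      all_goals simp only [PySem.Str.len_eq, String.length_toList] at hidx
      · have hre : r = 1 := by
          by_contra hre
          have h1 := hlow 1 (by omega)
          simp only [pvStarts, List.getD_cons_succ] at h1
          have := pvStarts_le ws (ci + PySem.Str.len w + 1) 0
            (by rw [pvStarts_length]; omega)
          have hg : PySem.Str.len w = (w.length : Int) := by simp
          omega
        subst hre
        simp [pvLoopA, pvStarts, hc, hidx]
      · have hloop : pvLoopA index (w :: ws) ci = pvLoopA index ws (ci + PySem.Str.len w + 1) := by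
          simp [pvLoopA, hidx]
        have htail : pvBoundary (pvStarts ws (ci + PySem.Str.len w + 1)) index (r - 1) := by
          refine ⟨by rw [pvStarts_length]; omega, ?_, ?_⟩
          · intro j hj
            have := hlow (j + 1) (by omega)
            simpa [pvStarts] using this
          · intro j hj hj2
            have := hhigh (j + 1) (by omega) (by rw [hlen, pvStarts_length] at *; omega)
            simpa [pvStarts] using this
        rw [hloop, ih _ _ htail]
        rcases Nat.lt_or_ge r 2 with h2 | h2
        · have hre : r = 1 := by omega
          subst hre
          simp [pvStarts, hidx]
        · have h1r : 1 ≤ r - 1 := by omega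
          have e1 : r - 1 = (r - 2) + 1 := by omega
          have e2 : r - 1 - 1 = r - 2 := by omega
          simp [hr1, e1, pvStarts]
    · have hr0 : r = 0 := by
        by_contra hr0
        have := hlow 0 (by omega)
        simp [pvStarts] at this
        omega
      subst hr0
      have hloop : pvLoopA index (w :: ws) ci = pvLoopA index ws (ci + PySem.Str.len w + 1) := by
        simp [pvLoopA, hc]
      have htail : pvBoundary (pvStarts ws (ci + PySem.Str.len w + 1)) index 0 := by
        refine ⟨by omega, by omega, ?_⟩
        intro j hj hj2
        have := hhigh (j + 1) (by omega) (by rw [hlen, pvStarts_length] at *; omega)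
        simpa [pvStarts] using this
      rw [hloop, ih _ _ htail]
      simp

-- ===== VERDICT (by name: the statement is the Claim_ definition above) =====
theorem word_at_idx_spec : Claim_equal_word_at_idx := by
  intro s index _
  unfold Spec_word_at_idx word_at_idx word_at_idx_alt
  have hb := pvBsearch_boundary (pvStarts (PySem.Str.split₀ s) 0) index
    (fun j k hjk hk => pvStarts_mono _ _ j k hjk hk)
    (pvStarts (PySem.Str.split₀ s) 0).length 0 (pvStarts (PySem.Str.split₀ s) 0).length
    rfl (by omega) le_rfl (by omega) (fun j hj hj2 => absurd hj2 (by omega))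
  simpa using pvLoopA_eq index (PySem.Str.split₀ s) 0 _ hb
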